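-- pv_equiv track=rewrite | github.com/Nikolay-Lysenko/rl-musician | rlmusician/environment/rules.py | check_validity_of_rhythmic_pattern
-- ===== SOURCE A (Python) =====
-- from typing import Callable, Dict, List
--
-- def check_validity_of_rhythmic_pattern(durations: List[int], **kwargs) -> bool:
--     """
--     Check that current measure is properly divided by notes.
--
--     :param durations:
--         durations (in eighths) of all notes from a current measure
--         (including a new note); if a new note prolongs to the next measure,
--         its full duration is included; however, if the first note starts
--         in the previous measure, only its duration within the current measure
--         is included
--     :return:
--         indicator whether a continuation is in accordance with the rule
--     """
--     valid_patterns = [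
--         [4, 4],
--         [4, 2, 2],
--         [4, 2, 1, 1],
--         [2, 2, 2, 2],
--         [2, 2, 2, 1, 1],
--         [2, 1, 1, 2, 2],
--         [4, 8],
--         [2, 2, 8],
--         [2, 1, 1, 8],
--     ]
--     for valid_pattern in valid_patterns:
--         if valid_pattern[:len(durations)] == durations:
--             return True
--     return False
-- ===== SOURCE B (Python) =====
-- from typing import List
--
-- _VALID_PATTERNS = [
--     [4, 4],
--     [4, 2, 2],
--     [4, 2, 1, 1],
--     [2, 2, 2, 2],
--     [2, 2, 2, 1, 1],
--     [2, 1, 1, 2, 2],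
--     [4, 8],
--     [2, 2, 8],
--     [2, 1, 1, 8],
-- ]
-- _VALID_PREFIXES = frozenset(
--     tuple(pattern[:i])
--     for pattern in _VALID_PATTERNS
--     for i in range(len(pattern) + 1)
-- )
--
-- def check_validity_of_rhythmic_pattern(durations: List[int], **kwargs) -> bool:
--     """Check that current measure is properly divided by notes."""
--     return tuple(durations) in _VALID_PREFIXES
-- ===== Notes on version B (the rewrite author's own statement) =====
-- stated objective: idiomatic
-- what changed: Replaces the per-call loop that prefix-compares durations against every pattern with a single membership test in a frozenset of all pattern prefixes precomputed once at module load.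
import Mathlib
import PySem

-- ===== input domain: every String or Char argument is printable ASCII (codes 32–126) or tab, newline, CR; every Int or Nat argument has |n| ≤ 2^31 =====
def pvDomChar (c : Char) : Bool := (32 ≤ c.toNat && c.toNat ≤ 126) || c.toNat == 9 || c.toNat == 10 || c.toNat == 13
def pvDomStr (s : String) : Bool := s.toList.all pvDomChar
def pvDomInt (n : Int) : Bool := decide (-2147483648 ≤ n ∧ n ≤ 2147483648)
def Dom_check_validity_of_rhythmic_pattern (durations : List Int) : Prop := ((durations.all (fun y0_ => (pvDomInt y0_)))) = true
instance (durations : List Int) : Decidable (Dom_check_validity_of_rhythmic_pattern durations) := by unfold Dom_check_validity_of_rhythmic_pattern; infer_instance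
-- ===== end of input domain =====

-- B replaces A's per-call loop of prefix comparisons by one membership test in a
-- precomputed set of all prefixes of the valid patterns (idiomatic; same results).

-- the shared table of valid rhythmic patterns (module-level data in both Pythons)
def pvPatterns : List (List Int) :=
  [[4, 4], [4, 2, 2], [4, 2, 1, 1], [2, 2, 2, 2], [2, 2, 2, 1, 1],
   [2, 1, 1, 2, 2], [4, 8], [2, 2, 8], [2, 1, 1, 8]]

-- ===== PORT A =====
-- the 'for valid_pattern in valid_patterns: if valid_pattern[:len(durations)] == durations: return True' loop
def pvLoopA (ps : List (List Int)) (durations : List Int) : Bool :=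
  match ps with
  | [] => false
  | p :: rest =>
      if PySem.List.slice p none (some (durations.length : Int)) == durations then true
      else pvLoopA rest durations

def check_validity_of_rhythmic_pattern (durations : List Int) : Bool :=
  pvLoopA pvPatterns durations

-- ===== PORT B =====
-- frozenset(tuple(pattern[:i]) for pattern in patterns for i in range(len(pattern)+1))
def pvValidPrefixes : PySem.Set (List Int) :=
  PySem.Set.ofList
    (pvPatterns.flatMap (fun p =>
      (PySem.List.pyRange 0 ((p.length : Int) + 1) 1).map
        (fun i => PySem.List.slice p none (some i))))

def check_validity_of_rhythmic_pattern_alt (durations : List Int) : Bool :=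
  PySem.Set.contains pvValidPrefixes durations

-- ===== PRECONDITION & SPEC =====
def Spec_check_validity_of_rhythmic_pattern (durations : List Int) (out : Bool) : Prop := out = check_validity_of_rhythmic_pattern_alt durations
instance (durations : List Int) (out : Bool) : Decidable (Spec_check_validity_of_rhythmic_pattern durations out) := by unfold Spec_check_validity_of_rhythmic_pattern; infer_instance

-- ===== CLAIM (what is proved, stated in full; the proofs are below) =====
def Claim_equal_check_validity_of_rhythmic_pattern : Prop := ∀ (durations : List Int), Dom_check_validity_of_rhythmic_pattern durations → Spec_check_validity_of_rhythmic_pattern durations (check_validity_of_rhythmic_pattern durations)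

-- ===== LEMMAS AND PROOFS =====

-- d is a prefix (a 'take') of p iff taking d.length from p gives back d
theorem pv_take_prefix_iff (p d : List Int) :
    p.take d.length = d ↔ ∃ i, i ≤ p.length ∧ p.take i = d := by
  constructor
  · intro h
    by_cases hl : d.length ≤ p.length
    · exact ⟨d.length, hl, h⟩
    · have hp : p.take d.length = p := List.take_of_length_le (by omega)
      refine ⟨p.length, le_rfl, ?_⟩
      rw [List.take_length, hp.symm.trans h]
  · rintro ⟨i, hi, rfl⟩
    have hlen : (p.take i).length = i := by simp [List.length_take]; omega
    rw [hlen]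

-- A's loop returns true iff some pattern in the list has durations as its take-prefix
theorem pv_loopA_iff (ps : List (List Int)) (d : List Int) :
    pvLoopA ps d = true ↔ ∃ p ∈ ps, p.take d.length = d := by
  induction ps with
  | nil => simp [pvLoopA]
  | cons p rest ih =>
      simp only [pvLoopA, PySem.List.slice_to_natCast]
      split_ifs with h
      · simp only [beq_iff_eq] at h
        simp [h]
      · simp only [beq_iff_eq] at h
        simp [ih, h]

-- B's prefix set contains d iff some pattern has d as a take-prefix
theorem pv_mem_prefixes_iff (d : List Int) :
    check_validity_of_rhythmic_pattern_alt d = true ↔ ∃ p ∈ pvPatterns, p.take d.length = d := by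
  unfold check_validity_of_rhythmic_pattern_alt pvValidPrefixes
  rw [PySem.Set.contains_iff, PySem.Set.mem_ofList]
  simp only [List.mem_flatMap, List.mem_map, PySem.List.mem_pyRange_one]
  constructor
  · rintro ⟨p, hp, i, ⟨h0, hlt⟩, hsl⟩
    refine ⟨p, hp, ?_⟩
    rw [PySem.List.slice_to p h0] at hsl
    exact (pv_take_prefix_iff p d).mpr ⟨i.toNat, by omega, hsl⟩
  · rintro ⟨p, hp, h⟩
    obtain ⟨i, hi, hti⟩ := (pv_take_prefix_iff p d).mp h
    refine ⟨p, hp, (i : Int), ⟨Int.natCast_nonneg i, by exact_mod_cast Int.ofNat_lt.mpr (Nat.lt_succ_of_le hi)⟩, ?_⟩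
    rw [PySem.List.slice_to p (by positivity)]
    simpa using hti

-- ===== VERDICT (by name: the statement is the Claim_ definition above) =====
theorem check_validity_of_rhythmic_pattern_spec : Claim_equal_check_validity_of_rhythmic_pattern := by
  intro d _
  unfold Spec_check_validity_of_rhythmic_pattern
  have := (pv_loopA_iff pvPatterns d).trans (pv_mem_prefixes_iff d).symm
  cases hA : check_validity_of_rhythmic_pattern d <;>
    cases hB : check_validity_of_rhythmic_pattern_alt d <;>
      simp_all [check_validity_of_rhythmic_pattern]
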